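-- pv_equiv track=rewrite | github.com/patjlm/adventofcode | day17/day17-1.py | top_height
-- ===== SOURCE A (Python) =====
-- y_min = -179
--
-- y_max = -124
--
-- def top_height(y_velocity):
--     y = 0
--     velocity = y_velocity
--     max_h = y_min
--     step = 0
--     while y >= y_min:
--         step += 1
--         y += velocity
--         max_h = max(max_h, y)
--         if y_min <= y <= y_max:
--             return max_h
--         velocity -= 1
--     return None
-- ===== SOURCE B (Python) =====
-- y_min = -179
--
-- y_max = -124
--
-- def top_height(y_velocity):
--     # Closed form: step-k position is p(k) = k*v - k*(k-1)/2.  p(k) <= y_max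
--     # iff (2k-s)^2 >= d with s = 2v+1, d = s^2 - 8*y_max, so the first step at
--     # or below the band is obtained from an integer square root of d.
--     v = y_velocity
--     s = 2 * v + 1
--     d = s * s - 8 * y_max
--     # r = floor(sqrt(d)) by binary search (invariant lo*lo <= d < hi*hi)
--     lo, hi = 0, d + 1
--     while hi - lo > 1:
--         mid = (lo + hi) // 2
--         if mid * mid <= d:
--             lo = mid
--         else:
--             hi = mid
--     r = lo
--     k = (s + r) // 2 if r * r == d else (s + r) // 2 + 1
--     if k * v - k * (k - 1) // 2 < y_min:
--         return None
--     return v * (v + 1) // 2 if v > 0 else v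
-- ===== Notes on version B (the rewrite author's own statement) =====
-- stated objective: faster
-- what changed: Replaces the step-by-step trajectory simulation with a closed form: the first step landing at or below the target band is obtained by solving the quadratic position formula with a binary-search integer square root, and the peak is v*(v+1)/2 for v>0 (else v).
import Mathlib
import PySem

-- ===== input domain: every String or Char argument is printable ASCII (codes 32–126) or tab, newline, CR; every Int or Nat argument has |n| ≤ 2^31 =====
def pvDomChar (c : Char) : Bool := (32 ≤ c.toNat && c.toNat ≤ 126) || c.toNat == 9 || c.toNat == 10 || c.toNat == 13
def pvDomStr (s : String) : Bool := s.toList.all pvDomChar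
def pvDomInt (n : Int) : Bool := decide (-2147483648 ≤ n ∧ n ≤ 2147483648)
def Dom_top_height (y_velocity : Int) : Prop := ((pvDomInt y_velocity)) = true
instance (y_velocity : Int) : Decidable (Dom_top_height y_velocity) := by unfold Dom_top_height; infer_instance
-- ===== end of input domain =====

-- B replaces A's step-by-step simulation by a closed form: the first step at or
-- below the target band is computed from an integer square root (binary search),
-- and the peak is v*(v+1)/2 for v > 0 (else v).

-- ===== PORT A =====
def y_min : Int := -179
def y_max : Int := -124

-- termination measure lemma for the while-loop (cited by name in decreasing_by)
lemma topLoop_dec (y velocity : Int) (h : y ≥ y_min) :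
    Prod.Lex (· < ·) (· < ·)
      ((velocity - 1 + 1).toNat, (y + velocity - y_min + 1).toNat)
      ((velocity + 1).toNat, (y - y_min + 1).toNat) := by
  simp only [y_min] at *
  by_cases hv : 0 ≤ velocity
  · exact Prod.Lex.left _ _ (by omega)
  · have h1 : (velocity - 1 + 1).toNat = (velocity + 1).toNat := by omega
    rw [h1]
    exact Prod.Lex.right _ (by omega)

-- the while-loop of A: state (y, velocity, max_h, step)
def topLoop (y velocity max_h step : Int) : Option Int :=
  if h : y ≥ y_min then
    let y2 := y + velocity
    let mh := max max_h y2
    if y_min ≤ y2 ∧ y2 ≤ y_max then some mh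
    else topLoop y2 (velocity - 1) mh (step + 1)
  else none
termination_by ((velocity + 1).toNat, (y - y_min + 1).toNat)
decreasing_by
  exact topLoop_dec y velocity h

def top_height (y_velocity : Int) : Option Int :=
  topLoop 0 y_velocity y_min 0

-- ===== PORT B =====
-- termination measure lemmas for the binary search (cited by name in decreasing_by)
lemma isqrt_dec_left (lo hi : Int) (h : hi - lo > 1) :
    (hi - PySem.Int.floordiv (lo + hi) 2).toNat < (hi - lo).toNat := by
  have hb := PySem.Int.floordiv_eq_ediv_of_pos (a := lo + hi) (b := 2) (by omega)
  omega

lemma isqrt_dec_right (lo hi : Int) (h : hi - lo > 1) :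
    (PySem.Int.floordiv (lo + hi) 2 - lo).toNat < (hi - lo).toNat := by
  have hb := PySem.Int.floordiv_eq_ediv_of_pos (a := lo + hi) (b := 2) (by omega)
  omega

-- binary-search integer square root of Source B (invariant lo*lo ≤ d < hi*hi)
def isqrtLoop (d lo hi : Int) : Int :=
  if h : hi - lo > 1 then
    let mid := PySem.Int.floordiv (lo + hi) 2
    if mid * mid ≤ d then isqrtLoop d mid hi else isqrtLoop d lo mid
  else lo
termination_by (hi - lo).toNat
decreasing_by
  · exact isqrt_dec_left lo hi h
  · exact isqrt_dec_right lo hi h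

def top_height_alt (y_velocity : Int) : Option Int :=
  let v := y_velocity
  let s := 2 * v + 1
  let d := s * s - 8 * y_max
  let r := isqrtLoop d 0 (d + 1)
  let k := if r * r = d then PySem.Int.floordiv (s + r) 2
           else PySem.Int.floordiv (s + r) 2 + 1
  if k * v - PySem.Int.floordiv (k * (k - 1)) 2 < y_min then none
  else some (if v > 0 then PySem.Int.floordiv (v * (v + 1)) 2 else v)

-- ===== PRECONDITION & SPEC =====
def Spec_top_height (y_velocity : Int) (out : Option Int) : Prop := out = top_height_alt y_velocity
instance (y_velocity : Int) (out : Option Int) : Decidable (Spec_top_height y_velocity out) := by unfold Spec_top_height; infer_instance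

-- ===== CLAIM (what is proved, stated in full; the proofs are below) =====
def Claim_equal_top_height : Prop := ∀ (y_velocity : Int), Dom_top_height y_velocity → Spec_top_height y_velocity (top_height y_velocity)

-- ===== LEMMAS AND PROOFS =====

-- position after j steps with initial velocity v
def P (v j : Int) : Int := j * v - (j * (j - 1)) / 2

-- closed form of the running maximum max_h after the step landing at P v j
def M (v j : Int) : Int :=
  if j = 0 then y_min
  else max y_min (if 0 < v then (if v ≤ j then P v v else P v j) else P v 1)

lemma two_mul_P (v j : Int) : 2 * P v j = 2 * (j * v) - j * (j - 1) := by
  unfold P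
  have he : Even (j * (j - 1)) := by
    have := Int.even_mul_succ_self (j - 1)
    simpa [mul_comm, sub_add_cancel] using this
  have h2 : (2 : Int) ∣ j * (j - 1) := he.two_dvd
  rw [mul_sub, Int.mul_ediv_cancel' h2]

lemma P_succ (v j : Int) : P v (j + 1) = P v j + (v - j) := by
  have h1 := two_mul_P v j
  have h2 := two_mul_P v (j + 1)
  ring_nf at h1 h2 ⊢
  linarith

lemma P_zero (v : Int) : P v 0 = 0 := by unfold P; simp

lemma P_one (v : Int) : P v 1 = v := by unfold P; simp

lemma P_le_P_v {v : Int} (hv : 0 < v) (j : Int) : P v j ≤ P v v := by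
  have h1 := two_mul_P v j
  have h2 := two_mul_P v v
  nlinarith [mul_self_nonneg (j - v), mul_self_nonneg (j - v - 1), sq_nonneg (2*j - 2*v - 1)]

lemma P_le_P_one {v : Int} (hv : v ≤ 0) {j : Int} (hj : 1 ≤ j) : P v j ≤ P v 1 := by
  have h1 := two_mul_P v j
  have h2 := two_mul_P v 1
  nlinarith [mul_nonneg (sub_nonneg.mpr hj) (show (0:Int) ≤ j - 2*v by omega)]

lemma P_mono_up {v j : Int} (hj : 1 ≤ j) (hjv : j ≤ v) : P v (j - 1) ≤ P v j := by
  have h2 := two_mul_P v j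
  have h1 : 2 * P v (j - 1) = 2 * ((j-1) * v) - (j-1) * (j - 2) := by
    have := two_mul_P v (j - 1); ring_nf at this ⊢; linarith
  nlinarith

-- bounds for the binary-search integer square root
lemma isqrt_bounds (d : Int) : ∀ (n : Nat) (lo hi : Int), (hi - lo).toNat ≤ n → 0 ≤ lo →
    lo < hi → lo * lo ≤ d → d < hi * hi →
    0 ≤ isqrtLoop d lo hi ∧ isqrtLoop d lo hi * isqrtLoop d lo hi ≤ d ∧
      d < (isqrtLoop d lo hi + 1) * (isqrtLoop d lo hi + 1) := by
  intro n
  induction n with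
  | zero => intro lo hi hn h0 hlh _ _; omega
  | succ n ih =>
    intro lo hi hn h0 hlh hlo hhi
    rw [isqrtLoop]
    by_cases hgt : hi - lo > 1
    · have hfd := PySem.Int.floordiv_eq_ediv_of_pos (a := lo + hi) (b := 2) (by omega)
      simp only [hgt, dif_pos]
      by_cases hmid : (PySem.Int.floordiv (lo + hi) 2) * (PySem.Int.floordiv (lo + hi) 2) ≤ d
      · rw [if_pos hmid]
        exact ih _ hi (by rw [hfd] at *; omega) (by rw [hfd]; omega) (by rw [hfd]; omega) hmid hhi
      · rw [if_neg hmid]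
        exact ih lo _ (by rw [hfd] at *; omega) h0 (by rw [hfd]; omega) hlo (by omega)
    · simp only [hgt, dif_neg, not_false_iff]
      have hhi1 : hi = lo + 1 := by omega
      subst hhi1
      exact ⟨h0, hlo, hhi⟩

-- characterisation of "position j is at or below y_max" via the computed first step
lemma char_lemma (v r : Int) (hr0 : 0 ≤ r)
    (hrl : r * r ≤ (2*v+1) * (2*v+1) - 8 * y_max)
    (hrh : (2*v+1) * (2*v+1) - 8 * y_max < (r+1) * (r+1)) :
    1 ≤ (if r * r = (2*v+1) * (2*v+1) - 8 * y_max then PySem.Int.floordiv ((2*v+1) + r) 2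
         else PySem.Int.floordiv ((2*v+1) + r) 2 + 1) ∧
    ∀ j : Int, 1 ≤ j →
      (P v j ≤ y_max ↔
        (if r * r = (2*v+1) * (2*v+1) - 8 * y_max then PySem.Int.floordiv ((2*v+1) + r) 2
         else PySem.Int.floordiv ((2*v+1) + r) 2 + 1) ≤ j) := by
  simp only [y_max] at *
  have hd : (2*v+1) * (2*v+1) - 8 * (-124 : Int) = (2*v+1) * (2*v+1) + 992 := by ring
  rw [hd] at hrl hrh
  simp only [hd]
  have hfd := PySem.Int.floordiv_eq_ediv_of_pos (a := (2*v+1) + r) (b := 2) (by omega)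
  -- r is at least |2v+1| (since (r+1)² exceeds (2v+1)²)
  have hrs1 : -(2*v+1) ≤ r := by
    by_contra hc
    nlinarith [mul_le_mul (show r+1 ≤ -(2*v+1) by omega) (show r+1 ≤ -(2*v+1) by omega)
      (show (0:Int) ≤ r+1 by omega) (show (0:Int) ≤ -(2*v+1) by omega)]
  have hrs2 : (2*v+1) ≤ r := by
    by_contra hc
    nlinarith [mul_le_mul (show r+1 ≤ (2*v+1) by omega) (show r+1 ≤ (2*v+1) by omega)
      (show (0:Int) ≤ r+1 by omega) (show (0:Int) ≤ (2*v+1) by omega)]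
  -- the quadratic form: for every j, P v j ≤ -124 ↔ (2j-(2v+1))² ≥ (2v+1)² + 992
  have hquad : ∀ j : Int, P v j ≤ -124 ↔
      (2*v+1) * (2*v+1) + 992 ≤ (2*j - (2*v+1)) * (2*j - (2*v+1)) := by
    intro j
    have h2P := two_mul_P v j
    have key : (2*j - (2*v+1)) * (2*j - (2*v+1))
        = (2*v+1) * (2*v+1) - 4 * (2 * (j * v) - j * (j-1)) := by ring
    constructor <;> intro h <;> linarith
  by_cases hsq : r * r = (2*v+1) * (2*v+1) + 992
  · -- perfect square: r must be odd, so (2v+1)+r is even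
    rw [if_pos hsq]
    have hrodd : r % 2 = 1 := by
      rcases Int.even_or_odd r with ⟨t, ht⟩ | ⟨t, ht⟩
      · exfalso
        have h1 : 4 * (t * t) = 4 * (v * v) + 4 * v + 993 := by
          have : r * r = (t + t) * (t + t) := by rw [ht]
          nlinarith
        have h2 : (4 : Int) * (t * t) % 4 = 0 := by omega
        omega
      · omega
    have heven : ((2*v+1) + r) % 2 = 0 := by omega
    have hne : r ≠ -(2*v+1) := by
      intro he; rw [he] at hsq; nlinarith
    constructor
    · -- 1 ≤ K : (2v+1)+r is even, nonnegative and nonzero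
      rw [hfd]; omega
    · intro j hj
      rw [hquad j, ← hsq]
      constructor
      · intro h
        -- x² ≥ r² with x := 2j-(2v+1); the negative branch is impossible for j ≥ 1
        by_contra hcon
        rw [hfd] at hcon
        have hx : 2*j - (2*v+1) < r := by omega
        have hxlow : -(r) < 2*j - (2*v+1) := by omega
        nlinarith [mul_pos (show (0:Int) < r - (2*j - (2*v+1)) by omega)
                           (show (0:Int) < r + (2*j - (2*v+1)) by omega)]
      · intro h
        rw [hfd] at h
        have hx : r ≤ 2*j - (2*v+1) := by omega
        nlinarith [mul_le_mul hx hx hr0 (by omega : (0:Int) ≤ 2*j - (2*v+1))]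
  · -- not a perfect square: r² < d < (r+1)², the first step needs x ≥ r+1
    rw [if_neg hsq]
    have hrl' : r * r < (2*v+1) * (2*v+1) + 992 := by omega
    constructor
    · rw [hfd]; omega
    · intro j hj
      rw [hquad j]
      constructor
      · intro h
        by_contra hcon
        rw [hfd] at hcon
        have hx : 2*j - (2*v+1) ≤ r := by omega
        have hxlow : -(r+1) < 2*j - (2*v+1) := by omega
        by_cases hpos : 0 ≤ 2*j - (2*v+1)
        · nlinarith [mul_le_mul hx hx hpos hr0]
        · nlinarith [mul_pos (show (0:Int) < r + 1 - (2*j - (2*v+1)) by omega)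
                             (show (0:Int) < r + 1 + (2*j - (2*v+1)) by omega)]
      · intro h
        rw [hfd] at h
        have hx : r + 1 ≤ 2*j - (2*v+1) := by omega
        nlinarith [mul_le_mul hx hx (by omega : (0:Int) ≤ r+1) (by omega : (0:Int) ≤ 2*j - (2*v+1))]

-- the running maximum follows the closed form M
lemma M_step (v j : Int) (hj : 1 ≤ j) : max (M v (j - 1)) (P v j) = M v j := by
  rcases eq_or_lt_of_le hj with h1 | h1
  · -- j = 1
    have hj1 : j = 1 := h1.symm
    subst hj1
    by_cases hv : 0 < v
    · by_cases hv1 : v ≤ 1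
      · have hveq : v = 1 := by omega
        subst hveq
        simp [M]
      · simp [M, hv, hv1]
    · simp [M, hv]
  · -- j ≥ 2
    have hjne : ¬ (j = 0) := by omega
    have hjne1 : ¬ (j - 1 = 0) := by omega
    by_cases hv : 0 < v
    · by_cases hle : v ≤ j - 1
      · have hPle : P v j ≤ P v v := P_le_P_v hv j
        simp only [M, if_neg hjne, if_neg hjne1, if_pos hv, if_pos hle,
          if_pos (show v ≤ j by omega)]
        rw [max_assoc, max_eq_left hPle]
      · by_cases hj2 : v ≤ j
        · have hveq : v = j := by omega
          have hmono : P v (j - 1) ≤ P v j := P_mono_up hj (by omega)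
          simp only [M, if_neg hjne, if_neg hjne1, if_pos hv, if_neg hle, if_pos hj2]
          rw [max_assoc, max_eq_right hmono, hveq]
        · have hmono : P v (j - 1) ≤ P v j := P_mono_up hj (by omega)
          simp only [M, if_neg hjne, if_neg hjne1, if_pos hv, if_neg hle, if_neg hj2]
          rw [max_assoc, max_eq_right hmono]
    · have hPle : P v j ≤ P v 1 := P_le_P_one (by omega) hj
      simp only [M, if_neg hjne, if_neg hjne1, if_neg hv]
      rw [max_assoc, max_eq_left hPle]

-- positions strictly before the first in-band step are above the band, hence above y_min
lemma pos_above (v K : Int)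
    (hchar : ∀ j : Int, 1 ≤ j → (P v j ≤ y_max ↔ K ≤ j)) {j : Int}
    (hj0 : 0 ≤ j) (hjK : j < K) : P v j ≥ y_min := by
  rcases eq_or_lt_of_le hj0 with h0 | h0
  · rw [← h0, P_zero]; simp [y_min]
  · have := (hchar j (by omega)).not
    simp only [y_min, y_max] at *
    omega

-- the result value of the loop from an arbitrary reached state
lemma loop_main (v K : Int) (hK1 : 1 ≤ K)
    (hchar : ∀ j : Int, 1 ≤ j → (P v j ≤ y_max ↔ K ≤ j)) :
    ∀ (n : Nat) (j : Int), 1 ≤ j → j ≤ K → (K - j).toNat = n → ∀ st,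
      topLoop (P v (j - 1)) (v - (j - 1)) (M v (j - 1)) st =
        (if y_min ≤ P v K then some (M v K) else none) := by
  intro n
  induction n with
  | zero =>
    intro j hj hjK hn st
    have hjeq : j = K := by omega
    rw [hjeq]
    rw [topLoop]
    have hguard : P v (K - 1) ≥ y_min := pos_above v K hchar (by omega) (by omega)
    rw [dif_pos hguard]
    have hstep : P v (K - 1) + (v - (K - 1)) = P v K := by
      have := P_succ v (K - 1); simp only [sub_add_cancel] at this; linarith
    simp only [hstep, M_step v K hK1]
    have hband : P v K ≤ y_max := (hchar K hK1).mpr le_rfl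
    by_cases hy : y_min ≤ P v K
    · rw [if_pos ⟨hy, hband⟩, if_pos hy]
    · rw [if_neg (by tauto), if_neg hy, topLoop, dif_neg (by omega)]
  | succ n ih =>
    intro j hj hjK hn st
    have hjK' : j < K := by omega
    rw [topLoop]
    have hguard : P v (j - 1) ≥ y_min := pos_above v K hchar (by omega) (by omega)
    rw [dif_pos hguard]
    have hstep : P v (j - 1) + (v - (j - 1)) = P v j := by
      have := P_succ v (j - 1); simp only [sub_add_cancel] at this; linarith
    simp only [hstep, M_step v j hj]
    have hband : ¬ (P v j ≤ y_max) := by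
      rw [hchar j hj]; omega
    rw [if_neg (by tauto)]
    have hrec := ih (j + 1) (by omega) (by omega) (by omega) (st + 1)
    simp only [add_sub_cancel_right] at hrec
    have harg : v - (j - 1) - 1 = v - j := by ring
    rw [harg]
    exact hrec

theorem main_equiv (v : Int) : top_height v = top_height_alt v := by
  have hd0 : (0:Int) ≤ (2*v+1) * (2*v+1) - 8 * y_max := by
    simp only [y_max]; nlinarith [mul_self_nonneg (2*v+1)]
  have hdlt : (2*v+1) * (2*v+1) - 8 * y_max
      < ((2*v+1) * (2*v+1) - 8 * y_max + 1) * ((2*v+1) * (2*v+1) - 8 * y_max + 1) := by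
    nlinarith
  have hb := isqrt_bounds ((2*v+1) * (2*v+1) - 8 * y_max)
      (((2*v+1) * (2*v+1) - 8 * y_max + 1) - 0).toNat 0
      ((2*v+1) * (2*v+1) - 8 * y_max + 1) le_rfl le_rfl (by omega) (by simpa using hd0) hdlt
  set r := isqrtLoop ((2*v+1) * (2*v+1) - 8 * y_max) 0 ((2*v+1) * (2*v+1) - 8 * y_max + 1)
    with hrdef
  obtain ⟨hr0, hrl, hrh⟩ := hb
  obtain ⟨hK1, hchar⟩ := char_lemma v r hr0 hrl hrh
  set K := (if r * r = (2*v+1) * (2*v+1) - 8 * y_max then PySem.Int.floordiv ((2*v+1) + r) 2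
         else PySem.Int.floordiv ((2*v+1) + r) 2 + 1) with hKdef
  have hloop := loop_main v K hK1 hchar (K - 1).toNat 1 le_rfl hK1 rfl 0
  have h0 : P v (1 - 1) = 0 := by simpa using P_zero v
  have hM0 : M v (1 - 1) = y_min := by norm_num [M]
  rw [h0, hM0] at hloop
  have hsub : v - (1 - 1) = v := by ring
  rw [hsub] at hloop
  have hlhs : top_height v = (if y_min ≤ P v K then some (M v K) else none) := by
    rw [top_height]; exact hloop
  -- now compute top_height_alt v
  have hPK : K * v - PySem.Int.floordiv (K * (K - 1)) 2 = P v K := by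
    rw [PySem.Int.floordiv_eq_ediv_of_pos (by omega)]; rfl
  rw [hlhs, top_height_alt]
  simp only [← hKdef, ← hrdef, hPK]
  by_cases hy : y_min ≤ P v K
  · rw [if_pos hy, if_neg (by omega)]
    congr 1
    by_cases hv : 0 < v
    · -- M v K = P v v = v*(v+1)//2
      have hvK : v ≤ K := by
        have hPv : ¬ (P v v ≤ y_max) := by
          have h2 := two_mul_P v v
          simp only [y_max]; nlinarith [mul_self_nonneg v]
        rw [hchar v (by omega)] at hPv; omega
      have hPv0 : (0:Int) ≤ P v v := by
        have h2 := two_mul_P v v; nlinarith [mul_self_nonneg v]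
      have hMK : M v K = P v v := by
        simp only [M, if_neg (show ¬ K = 0 by omega), if_pos hv, if_pos hvK]
        rw [max_eq_right (by simp only [y_min]; omega)]
      rw [hMK, if_pos hv, PySem.Int.floordiv_eq_ediv_of_pos (by omega)]
      have hvv : v * (v + 1) = 2 * P v v := by
        have := two_mul_P v v; ring_nf at this ⊢; linarith
      rw [hvv, Int.mul_ediv_cancel_left _ (by norm_num)]
    · -- M v K = v
      have hPle : P v K ≤ P v 1 := P_le_P_one (by omega) hK1
      have hMK : M v K = v := by
        simp only [M, if_neg (show ¬ K = 0 by omega), if_neg hv, P_one]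
        rw [max_eq_right (by rw [P_one] at hPle; omega)]
      rw [hMK, if_neg hv]
  · rw [if_neg hy, if_pos (by omega)]

-- ===== VERDICT (by name: the statement is the Claim_ definition above) =====
theorem top_height_spec : Claim_equal_top_height := by
  intro v _
  show top_height v = top_height_alt v
  exact main_equiv v
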